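-- pv_equiv track=rewrite | github.com/Kangsan-Jeon/AlgorithmTrain | SW_ExpertAcademy/[완] 4012_요리사.py | solve
-- ===== SOURCE A (Python) =====
-- def makeCase(N):
--     case = [[[0], []]]
--     for i in range(1, N):
--         newCase = []
--         while(len(case) != 0):
--             temp = case.pop()
--             if len(temp[0]) < N/2:
--                 newCase.append([temp[0] + [i], temp[1]])
--             if len(temp[1]) < N/2:
--                 newCase.append([temp[0], temp[1] + [i]])
--         case = newCase
--     return case
--
-- def calTaste(synergy, foods):
--     n = len(foods)
--     taste = 0
--     for i in range(n):
--         f1 = foods[i]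
--         for j in range(i+1, n):
--             f2 = foods[j]
--             taste = taste + synergy[f1][f2] + synergy[f2][f1]
--     return taste
--
-- def solve(synergy, N):
--     cases = makeCase(N)
--     minDiff = 320001
--     for case in cases:
--         a = case[0]
--         b = case[1]
--         taste_a = calTaste(synergy, a)
--         taste_b = calTaste(synergy, b)
--         minDiff = min(abs(taste_a - taste_b), minDiff)
--     return minDiff
-- ===== SOURCE B (Python) =====
-- def solve(synergy, N):
--     # Grow balanced partitions one ingredient at a time, carrying each group's
--     # taste incrementally (O(N) per new partition instead of O(N^2) re-summation).
--     parts = [([0], [], 0, 0)]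
--     for i in range(1, N):
--         nxt = []
--         for a, b, ta, tb in parts:
--             if 2 * len(a) < N:
--                 nxt.append((a + [i], b,
--                             ta + sum(synergy[f][i] + synergy[i][f] for f in a), tb))
--             if 2 * len(b) < N:
--                 nxt.append((a, b + [i], ta,
--                             tb + sum(synergy[f][i] + synergy[i][f] for f in b)))
--         parts = nxt
--     best = 320001
--     for _, _, ta, tb in parts:
--         best = min(best, abs(ta - tb))
--     return best
-- ===== Notes on version B (the rewrite author's own statement) =====
-- stated objective: alternative
-- what changed: B grows the balanced partitions while carrying each group's taste incrementally (adding ingredient i costs one O(|group|) sum), instead of A's separate case generation with a pop-reversing worklist followed by a full O(N^2) pairwise re-summation of both groups for every finished partition.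
import Mathlib
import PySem

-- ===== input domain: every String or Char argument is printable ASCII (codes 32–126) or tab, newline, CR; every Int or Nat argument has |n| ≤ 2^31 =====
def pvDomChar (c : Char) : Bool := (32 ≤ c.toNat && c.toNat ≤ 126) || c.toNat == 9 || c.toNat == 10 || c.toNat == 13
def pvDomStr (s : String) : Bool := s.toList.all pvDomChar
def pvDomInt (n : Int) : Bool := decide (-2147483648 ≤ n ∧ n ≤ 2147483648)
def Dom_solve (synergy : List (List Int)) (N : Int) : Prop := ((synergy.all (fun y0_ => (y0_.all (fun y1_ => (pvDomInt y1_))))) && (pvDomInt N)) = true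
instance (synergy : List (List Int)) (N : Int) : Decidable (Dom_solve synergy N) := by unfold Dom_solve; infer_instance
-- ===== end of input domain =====

-- B replaces A's generate-then-rescore scheme by one pass that carries each group's taste
-- incrementally (objective: alternative — fewer pair re-summations; speed not measured here).

-- ===== PORT A =====
-- A's `while case: temp = case.pop(); …append…` consumes `case` from the END: it is a fold
-- over `case.reverse` (exact).  `len(t) < N/2` on ints is exact as `2*len(t) < N`.
def makeCase (N : Int) : List (List Int × List Int) :=
  (PySem.List.pyRange 1 N 1).foldl
    (fun case i =>
      case.reverse.foldl
        (fun newCase temp =>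
          let newCase := if 2 * (temp.1.length : Int) < N then newCase ++ [(temp.1 ++ [i], temp.2)] else newCase
          if 2 * (temp.2.length : Int) < N then newCase ++ [(temp.1, temp.2 ++ [i])] else newCase)
        [])
    [([0], [])]

def calTaste (synergy : List (List Int)) (foods : List Int) : Int :=
  let n : Int := foods.length
  (PySem.List.pyRange 0 n 1).foldl
    (fun taste i =>
      let f1 := PySem.List.pyGetD foods i 0
      (PySem.List.pyRange (i + 1) n 1).foldl
        (fun taste j =>
          let f2 := PySem.List.pyGetD foods j 0
          taste + PySem.List.pyGetD (PySem.List.pyGetD synergy f1 []) f2 0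
                + PySem.List.pyGetD (PySem.List.pyGetD synergy f2 []) f1 0)
        taste)
    0

def solve (synergy : List (List Int)) (N : Int) : Int :=
  (makeCase N).foldl
    (fun minDiff case =>
      let taste_a := calTaste synergy case.1
      let taste_b := calTaste synergy case.2
      min |taste_a - taste_b| minDiff)
    320001

-- ===== PORT B =====
def solve_alt (synergy : List (List Int)) (N : Int) : Int :=
  let parts : List (List Int × List Int × Int × Int) :=
    (PySem.List.pyRange 1 N 1).foldl
      (fun parts i =>
        parts.foldl
          (fun nxt q =>
            let a := q.1; let b := q.2.1; let ta := q.2.2.1; let tb := q.2.2.2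
            let nxt := if 2 * (a.length : Int) < N then
                nxt ++ [(a ++ [i], b,
                         ta + (a.map (fun f =>
                           PySem.List.pyGetD (PySem.List.pyGetD synergy f []) i 0
                         + PySem.List.pyGetD (PySem.List.pyGetD synergy i []) f 0)).sum, tb)]
              else nxt
            if 2 * (b.length : Int) < N then
                nxt ++ [(a, b ++ [i], ta,
                         tb + (b.map (fun f =>
                           PySem.List.pyGetD (PySem.List.pyGetD synergy f []) i 0
                         + PySem.List.pyGetD (PySem.List.pyGetD synergy i []) f 0)).sum)]
              else nxt)
          [])
      [([0], [], 0, 0)]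
  parts.foldl (fun best q => min best |q.2.2.1 - q.2.2.2|) 320001

-- ===== PRECONDITION & SPEC =====
-- Exactly where the Python A returns: for N ≥ 3 both programs read every off-diagonal
-- entry synergy[i][j] (i ≠ j < N) and raise IndexError if one is missing; for N ≤ 2 the
-- matrix is never read.  (The Lean ports are total via pyGetD defaults and agree even
-- outside Pre_, so the proof below does not need the hypothesis; Pre_ only delimits
-- where the Pythons return.)
def Pre_solve (synergy : List (List Int)) (N : Int) : Prop :=
  N ≤ 2 ∨ (N ≤ (synergy.length : Int) ∧
    ∀ i ∈ PySem.List.pyRange 0 N 1, ∀ j ∈ PySem.List.pyRange 0 N 1, i ≠ j →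
      j < ((PySem.List.pyGetD synergy i []).length : Int))
instance (synergy : List (List Int)) (N : Int) : Decidable (Pre_solve synergy N) := by
  unfold Pre_solve; infer_instance

def pvWitness_solve : List (List Int) × Int := ([[0, 3], [3, 0]], 2)

def Spec_solve (synergy : List (List Int)) (N : Int) (out : Int) : Prop := out = solve_alt synergy N
instance (synergy : List (List Int)) (N : Int) (out : Int) : Decidable (Spec_solve synergy N out) := by
  unfold Spec_solve; infer_instance

-- ===== CLAIM (what is proved, stated in full; the proofs are below) =====
def Claim_equal_solve : Prop := ∀ (synergy : List (List Int)) (N : Int), Dom_solve synergy N → Pre_solve synergy N → Spec_solve synergy N (solve synergy N)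

-- ===== LEMMAS AND PROOFS =====

-- symmetric pair weight
def pvS (synergy : List (List Int)) (x y : Int) : Int :=
  PySem.List.pyGetD (PySem.List.pyGetD synergy x []) y 0
  + PySem.List.pyGetD (PySem.List.pyGetD synergy y []) x 0

theorem pyGetD_append_lt (xs : List Int) (y : Int) (j : Int) (h0 : 0 ≤ j) (h : j < (xs.length : Int)) :
    PySem.List.pyGetD (xs ++ [y]) j 0 = PySem.List.pyGetD xs j 0 := by
  rw [PySem.List.pyGetD_eq_getElem _ _ h0 (by simp; omega), PySem.List.pyGetD_eq_getElem _ _ h0 h]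
  rw [List.getElem_append_left]

theorem pyGetD_append_len (xs : List Int) (y : Int) :
    PySem.List.pyGetD (xs ++ [y]) (xs.length : Int) 0 = y := by
  rw [PySem.List.pyGetD_eq_getElem _ _ (by positivity) (by simp)]
  simp

-- closed form of calTaste as a double sum
theorem calTaste_eq_sum (synergy : List (List Int)) (foods : List Int) :
    calTaste synergy foods =
      ((PySem.List.pyRange 0 (foods.length : Int) 1).map (fun i =>
        ((PySem.List.pyRange (i + 1) (foods.length : Int) 1).map (fun j =>
          pvS synergy (PySem.List.pyGetD foods i 0) (PySem.List.pyGetD foods j 0))).sum)).sum := by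
  unfold calTaste
  rw [PySem.List.foldl_congr_mem _ _
    (fun taste i => taste + ((PySem.List.pyRange (i + 1) (foods.length : Int) 1).map (fun j =>
          pvS synergy (PySem.List.pyGetD foods i 0) (PySem.List.pyGetD foods j 0))).sum) _ ?_]
  · rw [PySem.List.foldl_add]; simp
  · intro acc i hi
    rw [PySem.List.foldl_congr_mem _ _
      (fun taste j => taste + pvS synergy (PySem.List.pyGetD foods i 0) (PySem.List.pyGetD foods j 0)) _ ?_]
    · exact PySem.List.foldl_add _ _ _
    · intro t j hj; simp only [pvS]; ring

-- taste of a group after appending one ingredient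
theorem calTaste_snoc (synergy : List (List Int)) (xs : List Int) (y : Int) :
    calTaste synergy (xs ++ [y]) =
      calTaste synergy xs + (xs.map (fun f => pvS synergy f y)).sum := by
  rw [calTaste_eq_sum, calTaste_eq_sum]
  have hL : (((xs ++ [y]).length : Int)) = (xs.length : Int) + 1 := by simp
  rw [hL]
  rw [PySem.List.pyRange_one_succ_right (by positivity)]
  rw [List.map_append, List.sum_append]
  have hnil : PySem.List.pyRange ((xs.length : Int) + 1) ((xs.length : Int) + 1) 1 = [] :=
    PySem.List.pyRange_one_eq_nil le_rfl
  have hmain : (PySem.List.pyRange 0 (xs.length : Int) 1).map (fun i =>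
        ((PySem.List.pyRange (i + 1) ((xs.length : Int) + 1) 1).map (fun j =>
          pvS synergy (PySem.List.pyGetD (xs ++ [y]) i 0) (PySem.List.pyGetD (xs ++ [y]) j 0))).sum)
      = (PySem.List.pyRange 0 (xs.length : Int) 1).map (fun i =>
        ((PySem.List.pyRange (i + 1) (xs.length : Int) 1).map (fun j =>
          pvS synergy (PySem.List.pyGetD xs i 0) (PySem.List.pyGetD xs j 0))).sum
        + pvS synergy (PySem.List.pyGetD xs i 0) y) := by
    apply List.map_congr_left
    intro i hi
    rw [PySem.List.mem_pyRange_one] at hi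
    rw [PySem.List.pyRange_one_succ_right (by omega)]
    rw [List.map_append, List.sum_append]
    rw [pyGetD_append_lt _ _ _ (by omega) (by omega)]
    simp only [List.map_cons, List.map_nil, List.sum_cons, List.sum_nil, add_zero]
    rw [pyGetD_append_len]
    congr 1
    apply congrArg
    apply List.map_congr_left
    intro j hj
    rw [PySem.List.mem_pyRange_one] at hj
    rw [pyGetD_append_lt _ _ _ (by omega) (by omega)]
  rw [hmain, PySem.List.sum_map_add_int]
  have hxs : (PySem.List.pyRange 0 (xs.length : Int) 1).map (fun i => pvS synergy (PySem.List.pyGetD xs i 0) y)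
      = xs.map (fun f => pvS synergy f y) := by
    have h2 : (PySem.List.pyRange 0 (xs.length : Int) 1).map (fun i => pvS synergy (PySem.List.pyGetD xs i 0) y)
        = ((PySem.List.pyRange 0 (xs.length : Int) 1).map (fun j => PySem.List.pyGetD xs j 0)).map (fun f => pvS synergy f y) := by
      rw [List.map_map]; rfl
    rw [h2, PySem.List.map_pyGetD_pyRange_zero']
  rw [hxs]
  simp [hnil]

-- A's one step (pop loop) as a flatMap over the reversed worklist
def childA (N i : Int) (t : List Int × List Int) : List (List Int × List Int) :=
  (if 2 * (t.1.length : Int) < N then [(t.1 ++ [i], t.2)] else [])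
  ++ (if 2 * (t.2.length : Int) < N then [(t.1, t.2 ++ [i])] else [])

def childB (synergy : List (List Int)) (N i : Int) (q : List Int × List Int × Int × Int) :
    List (List Int × List Int × Int × Int) :=
  (if 2 * (q.1.length : Int) < N then
      [(q.1 ++ [i], q.2.1,
        q.2.2.1 + (q.1.map (fun f =>
          PySem.List.pyGetD (PySem.List.pyGetD synergy f []) i 0
        + PySem.List.pyGetD (PySem.List.pyGetD synergy i []) f 0)).sum, q.2.2.2)]
    else [])
  ++ (if 2 * (q.2.1.length : Int) < N then
      [(q.1, q.2.1 ++ [i], q.2.2.1,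
        q.2.2.2 + (q.2.1.map (fun f =>
          PySem.List.pyGetD (PySem.List.pyGetD synergy f []) i 0
        + PySem.List.pyGetD (PySem.List.pyGetD synergy i []) f 0)).sum)]
    else [])

def pvProj (q : List Int × List Int × Int × Int) : List Int × List Int := (q.1, q.2.1)

def pvInv (synergy : List (List Int)) (q : List Int × List Int × Int × Int) : Prop :=
  q.2.2.1 = calTaste synergy q.1 ∧ q.2.2.2 = calTaste synergy q.2.1

def stepAfun (N : Int) (case : List (List Int × List Int)) (i : Int) : List (List Int × List Int) :=
  case.reverse.foldl
    (fun newCase temp =>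
      let newCase := if 2 * (temp.1.length : Int) < N then newCase ++ [(temp.1 ++ [i], temp.2)] else newCase
      if 2 * (temp.2.length : Int) < N then newCase ++ [(temp.1, temp.2 ++ [i])] else newCase)
    []

def stepBfun (synergy : List (List Int)) (N : Int)
    (parts : List (List Int × List Int × Int × Int)) (i : Int) :
    List (List Int × List Int × Int × Int) :=
  parts.foldl
    (fun nxt q =>
      let a := q.1; let b := q.2.1; let ta := q.2.2.1; let tb := q.2.2.2
      let nxt := if 2 * (a.length : Int) < N then
          nxt ++ [(a ++ [i], b,
                   ta + (a.map (fun f =>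
                     PySem.List.pyGetD (PySem.List.pyGetD synergy f []) i 0
                   + PySem.List.pyGetD (PySem.List.pyGetD synergy i []) f 0)).sum, tb)]
        else nxt
      if 2 * (b.length : Int) < N then
          nxt ++ [(a, b ++ [i], ta,
                   tb + (b.map (fun f =>
                     PySem.List.pyGetD (PySem.List.pyGetD synergy f []) i 0
                   + PySem.List.pyGetD (PySem.List.pyGetD synergy i []) f 0)).sum)]
        else nxt)
    []

theorem solve_eq_fold (synergy : List (List Int)) (N : Int) :
    solve synergy N =
      ((PySem.List.pyRange 1 N 1).foldl (stepAfun N) [([0], [])]).foldl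
        (fun minDiff case => min |calTaste synergy case.1 - calTaste synergy case.2| minDiff) 320001 := rfl

theorem solve_alt_eq_fold (synergy : List (List Int)) (N : Int) :
    solve_alt synergy N =
      ((PySem.List.pyRange 1 N 1).foldl (stepBfun synergy N) [([0], [], 0, 0)]).foldl
        (fun best q => min best |q.2.2.1 - q.2.2.2|) 320001 := rfl

theorem stepAfun_eq (N : Int) (case : List (List Int × List Int)) (i : Int) :
    stepAfun N case i = case.reverse.flatMap (childA N i) := by
  unfold stepAfun
  rw [PySem.List.foldl_congr_mem _ _ (fun acc t => acc ++ childA N i t) _ ?_]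
  · rw [PySem.List.foldl_append_eq_flatMap]; simp
  · intro acc t ht
    simp only [childA]
    split_ifs <;> simp

theorem stepBfun_eq (synergy : List (List Int)) (N : Int)
    (parts : List (List Int × List Int × Int × Int)) (i : Int) :
    stepBfun synergy N parts i = parts.flatMap (childB synergy N i) := by
  unfold stepBfun
  rw [PySem.List.foldl_congr_mem _ _ (fun acc q => acc ++ childB synergy N i q) _ ?_]
  · rw [PySem.List.foldl_append_eq_flatMap]; simp
  · intro acc q hq
    simp only [childB]
    split_ifs <;> simp

theorem childA_proj (synergy : List (List Int)) (N i : Int) (q : List Int × List Int × Int × Int) :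
    childA N i (pvProj q) = (childB synergy N i q).map pvProj := by
  obtain ⟨a, b, ta, tb⟩ := q
  simp only [childA, childB, pvProj]
  split_ifs <;> simp [pvProj]

theorem inv_child (synergy : List (List Int)) (N i : Int)
    (q q' : List Int × List Int × Int × Int)
    (hmem : q' ∈ childB synergy N i q) (hinv : pvInv synergy q) : pvInv synergy q' := by
  obtain ⟨a, b, ta, tb⟩ := q
  obtain ⟨h1, h2⟩ := hinv
  dsimp only at h1 h2
  simp only [childB, List.mem_append] at hmem
  rcases hmem with hmem | hmem
  · split_ifs at hmem with hc
    · simp only [List.mem_singleton] at hmem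
      subst hmem
      refine ⟨?_, h2⟩
      show ta + _ = calTaste synergy (a ++ [i])
      rw [calTaste_snoc, h1]; rfl
    · simp at hmem
  · split_ifs at hmem with hc
    · simp only [List.mem_singleton] at hmem
      subst hmem
      refine ⟨h1, ?_⟩
      show tb + _ = calTaste synergy (b ++ [i])
      rw [calTaste_snoc, h2]; rfl
    · simp at hmem

theorem loop_inv (synergy : List (List Int)) (N : Int) :
    ∀ (l : List Int) (ca : List (List Int × List Int)) (pa : List (List Int × List Int × Int × Int)),
      ca.Perm (pa.map pvProj) → (∀ q ∈ pa, pvInv synergy q) →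
      (l.foldl (stepAfun N) ca).Perm ((l.foldl (stepBfun synergy N) pa).map pvProj)
        ∧ ∀ q ∈ l.foldl (stepBfun synergy N) pa, pvInv synergy q := by
  intro l
  induction l with
  | nil => intro ca pa h1 h2; exact ⟨h1, h2⟩
  | cons i is ih =>
    intro ca pa h1 h2
    simp only [List.foldl_cons]
    apply ih
    · rw [stepAfun_eq, stepBfun_eq]
      have p1 : (ca.reverse.flatMap (childA N i)).Perm (ca.flatMap (childA N i)) :=
        (ca.reverse_perm).flatMap_right _
      have p2 : (ca.flatMap (childA N i)).Perm ((pa.map pvProj).flatMap (childA N i)) :=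
        h1.flatMap_right _
      have e3 : (pa.map pvProj).flatMap (childA N i) = pa.flatMap (fun q => (childB synergy N i q).map pvProj) := by
        rw [List.flatMap_map]
        exact congrArg (fun f => pa.flatMap f) (funext fun q => childA_proj synergy N i q)
      have e4 : pa.flatMap (fun q => (childB synergy N i q).map pvProj)
          = (pa.flatMap (childB synergy N i)).map pvProj := by rw [List.map_flatMap]
      exact (p1.trans p2).trans (by rw [e3, e4])
    · intro q hq
      rw [stepBfun_eq] at hq
      simp only [List.mem_flatMap] at hq
      obtain ⟨p, hp, hmem⟩ := hq
      exact inv_child synergy N i p q hmem (h2 p hp)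

theorem calTaste_nil (synergy : List (List Int)) : calTaste synergy [] = 0 := by
  rw [calTaste_eq_sum]; simp [PySem.List.pyRange_one_eq_nil le_rfl]

theorem calTaste_single (synergy : List (List Int)) (x : Int) : calTaste synergy [x] = 0 := by
  have h := calTaste_snoc synergy [] x
  simpa [calTaste_nil] using h

-- ===== VERDICT (by name: the statement is the Claim_ definition above) =====
theorem solve_spec : Claim_equal_solve := by
  intro synergy N _ _
  unfold Spec_solve
  obtain ⟨hperm, hinv⟩ := loop_inv synergy N (PySem.List.pyRange 1 N 1) [([0], [])] [([0], [], 0, 0)]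
    (by simp [pvProj]) (by
      intro q hq
      simp only [List.mem_singleton] at hq
      subst hq
      exact ⟨(calTaste_single synergy 0).symm, (calTaste_nil synergy).symm⟩)
  rw [solve_eq_fold, solve_alt_eq_fold]
  rw [List.Perm.foldl_eq (rcomm := ⟨by
      intro b a a'
      exact min_left_comm _ _ _⟩) hperm]
  rw [List.foldl_map]
  apply PySem.List.foldl_congr_mem
  intro acc q hq
  obtain ⟨ha, hb⟩ := hinv q hq
  simp only [pvProj]
  rw [← ha, ← hb, min_comm]
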